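-- pv_equiv track=rewrite | github.com/Orcadebug/Linux | ai-native-linux-os/src/ai_orchestrator/agents/activity_tracker_agent.py | _categorize_command
-- ===== SOURCE A (Python) =====
-- def _categorize_command(command: str) -> str:
--     """Categorize command by type"""
--     command_lower = command.lower()
--
--     # Development commands
--     if any(word in command_lower for word in ['git', 'python', 'pip', 'npm', 'node', 'java', 'gcc', 'make']):
--         return 'development'
--
--     # File operations
--     elif any(word in command_lower for word in ['ls', 'cd', 'cp', 'mv', 'rm', 'mkdir', 'find', 'grep']):
--         return 'file_operations'
--
--     # System administration
--     elif any(word in command_lower for word in ['sudo', 'apt', 'yum', 'systemctl', 'service', 'crontab']):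
--         return 'system_admin'
--
--     # Network operations
--     elif any(word in command_lower for word in ['wget', 'curl', 'ssh', 'scp', 'ping', 'netstat']):
--         return 'network'
--
--     # AI/ML operations
--     elif any(word in command_lower for word in ['nvidia-smi', 'jupyter', 'tensorboard', 'conda']):
--         return 'ai_ml'
--
--     # Text processing
--     elif any(word in command_lower for word in ['sed', 'awk', 'sort', 'uniq', 'head', 'tail', 'cat']):
--         return 'text_processing'
--
--     # Media operations
--     elif any(word in command_lower for word in ['ffmpeg', 'convert', 'gimp', 'vlc']):
--         return 'media'
--
--     else:
--         return 'other'
-- ===== SOURCE B (Python) =====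
-- # Inverted index: each keyword maps to (category priority, category name);
-- # the answer is the minimum-priority category among all matching keywords.
-- _KEYWORD_PRIORITY = {
--     'git': (0, 'development'),
--     'python': (0, 'development'),
--     'pip': (0, 'development'),
--     'npm': (0, 'development'),
--     'node': (0, 'development'),
--     'java': (0, 'development'),
--     'gcc': (0, 'development'),
--     'make': (0, 'development'),
--     'ls': (1, 'file_operations'),
--     'cd': (1, 'file_operations'),
--     'cp': (1, 'file_operations'),
--     'mv': (1, 'file_operations'),
--     'rm': (1, 'file_operations'),
--     'mkdir': (1, 'file_operations'),
--     'find': (1, 'file_operations'),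
--     'grep': (1, 'file_operations'),
--     'sudo': (2, 'system_admin'),
--     'apt': (2, 'system_admin'),
--     'yum': (2, 'system_admin'),
--     'systemctl': (2, 'system_admin'),
--     'service': (2, 'system_admin'),
--     'crontab': (2, 'system_admin'),
--     'wget': (3, 'network'),
--     'curl': (3, 'network'),
--     'ssh': (3, 'network'),
--     'scp': (3, 'network'),
--     'ping': (3, 'network'),
--     'netstat': (3, 'network'),
--     'nvidia-smi': (4, 'ai_ml'),
--     'jupyter': (4, 'ai_ml'),
--     'tensorboard': (4, 'ai_ml'),
--     'conda': (4, 'ai_ml'),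
--     'sed': (5, 'text_processing'),
--     'awk': (5, 'text_processing'),
--     'sort': (5, 'text_processing'),
--     'uniq': (5, 'text_processing'),
--     'head': (5, 'text_processing'),
--     'tail': (5, 'text_processing'),
--     'cat': (5, 'text_processing'),
--     'ffmpeg': (6, 'media'),
--     'convert': (6, 'media'),
--     'gimp': (6, 'media'),
--     'vlc': (6, 'media'),
-- }
--
--
-- def _categorize_command(command: str) -> str:
--     command_lower = command.lower()
--     best = min(
--         (pc for kw, pc in _KEYWORD_PRIORITY.items() if kw in command_lower),
--         default=None,
--     )
--     return 'other' if best is None else best[1]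
-- ===== Notes on version B (the rewrite author's own statement) =====
-- stated objective: alternative
-- what changed: Replaces the ordered per-category if/elif any-substring chain with an inverted keyword->(priority, category) index: one pass collects every matching keyword's pair and returns min() of them (default 'other'), selecting the best-priority category instead of scanning categories in order with early exit.
import Mathlib
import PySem

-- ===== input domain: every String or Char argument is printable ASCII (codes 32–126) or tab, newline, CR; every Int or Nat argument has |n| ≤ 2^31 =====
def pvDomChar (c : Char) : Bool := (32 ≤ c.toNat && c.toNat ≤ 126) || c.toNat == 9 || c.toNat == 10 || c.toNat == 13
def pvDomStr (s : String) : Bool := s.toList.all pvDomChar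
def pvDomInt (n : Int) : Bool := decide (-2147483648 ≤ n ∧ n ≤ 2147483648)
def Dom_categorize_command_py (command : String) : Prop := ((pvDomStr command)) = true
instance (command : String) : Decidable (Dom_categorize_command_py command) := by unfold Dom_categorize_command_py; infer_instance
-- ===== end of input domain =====

-- B replaces A's ordered per-category if/elif chain by an inverted keyword→(priority, category)
-- index and returns the minimum-priority category among all matching keywords (objective: alternative).

-- ===== PORT A =====
def categorize_command_py (command : String) : String :=
  let command_lower := PySem.Str.lower command
  if (["git", "python", "pip", "npm", "node", "java", "gcc", "make"].any
      (fun word => PySem.Str.isIn word command_lower)) then "development"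
  else if (["ls", "cd", "cp", "mv", "rm", "mkdir", "find", "grep"].any
      (fun word => PySem.Str.isIn word command_lower)) then "file_operations"
  else if (["sudo", "apt", "yum", "systemctl", "service", "crontab"].any
      (fun word => PySem.Str.isIn word command_lower)) then "system_admin"
  else if (["wget", "curl", "ssh", "scp", "ping", "netstat"].any
      (fun word => PySem.Str.isIn word command_lower)) then "network"
  else if (["nvidia-smi", "jupyter", "tensorboard", "conda"].any
      (fun word => PySem.Str.isIn word command_lower)) then "ai_ml"
  else if (["sed", "awk", "sort", "uniq", "head", "tail", "cat"].any
      (fun word => PySem.Str.isIn word command_lower)) then "text_processing"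
  else if (["ffmpeg", "convert", "gimp", "vlc"].any
      (fun word => PySem.Str.isIn word command_lower)) then "media"
  else "other"

-- ===== PORT B =====
-- Python tuple comparison (p1, c1) < (p2, c2), lexicographic
def pvLexLt (a b : Int × String) : Bool := a.1 < b.1 || (a.1 == b.1 && a.2 < b.2)

-- one step of Python's min: replace the current minimum only when strictly smaller
def pvMinOpt (acc : Option (Int × String)) (pc : Int × String) : Option (Int × String) :=
  match acc with
  | none => some pc
  | some cur => some (if pvLexLt pc cur then pc else cur)

-- _KEYWORD_PRIORITY.items(): keyword → (category priority, category name), insertion order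
def pvKeywordIndex : List ((Int × String) × String) :=
  [((0, "development"), "git"),
   ((0, "development"), "python"),
   ((0, "development"), "pip"),
   ((0, "development"), "npm"),
   ((0, "development"), "node"),
   ((0, "development"), "java"),
   ((0, "development"), "gcc"),
   ((0, "development"), "make"),
   ((1, "file_operations"), "ls"),
   ((1, "file_operations"), "cd"),
   ((1, "file_operations"), "cp"),
   ((1, "file_operations"), "mv"),
   ((1, "file_operations"), "rm"),
   ((1, "file_operations"), "mkdir"),
   ((1, "file_operations"), "find"),
   ((1, "file_operations"), "grep"),
   ((2, "system_admin"), "sudo"),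
   ((2, "system_admin"), "apt"),
   ((2, "system_admin"), "yum"),
   ((2, "system_admin"), "systemctl"),
   ((2, "system_admin"), "service"),
   ((2, "system_admin"), "crontab"),
   ((3, "network"), "wget"),
   ((3, "network"), "curl"),
   ((3, "network"), "ssh"),
   ((3, "network"), "scp"),
   ((3, "network"), "ping"),
   ((3, "network"), "netstat"),
   ((4, "ai_ml"), "nvidia-smi"),
   ((4, "ai_ml"), "jupyter"),
   ((4, "ai_ml"), "tensorboard"),
   ((4, "ai_ml"), "conda"),
   ((5, "text_processing"), "sed"),
   ((5, "text_processing"), "awk"),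
   ((5, "text_processing"), "sort"),
   ((5, "text_processing"), "uniq"),
   ((5, "text_processing"), "head"),
   ((5, "text_processing"), "tail"),
   ((5, "text_processing"), "cat"),
   ((6, "media"), "ffmpeg"),
   ((6, "media"), "convert"),
   ((6, "media"), "gimp"),
   ((6, "media"), "vlc")]

-- min(generator of matching (priority, category) pairs, default=None)
def categorize_command_py_alt (command : String) : String :=
  let command_lower := PySem.Str.lower command
  let best := pvKeywordIndex.foldl
    (fun acc e => if PySem.Str.isIn e.2 command_lower then pvMinOpt acc e.1 else acc) none
  match best with
  | none => "other"
  | some pc => pc.2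

-- ===== PRECONDITION & SPEC =====
def Spec_categorize_command_py (command : String) (out : String) : Prop := out = categorize_command_py_alt command
instance (command : String) (out : String) : Decidable (Spec_categorize_command_py command out) := by unfold Spec_categorize_command_py; infer_instance

-- ===== CLAIM (what is proved, stated in full; the proofs are below) =====
def Claim_equal_categorize_command_py : Prop := ∀ (command : String), Dom_categorize_command_py command → Spec_categorize_command_py command (categorize_command_py command)

-- ===== LEMMAS AND PROOFS =====

theorem pvLexLt_irrefl (a : Int × String) : pvLexLt a a = false := by
  simp [pvLexLt]

-- folding the min step over the same pair twice is the same as once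
theorem pvMinOpt_idem (acc : Option (Int × String)) (pc : Int × String) :
    pvMinOpt (pvMinOpt acc pc) pc = pvMinOpt acc pc := by
  cases acc with
  | none => simp [pvMinOpt, pvLexLt_irrefl]
  | some cur =>
    simp only [pvMinOpt]
    by_cases h : pvLexLt pc cur = true
    · simp [h, pvLexLt_irrefl]
    · simp [h]

-- B's fold over one category's block of keywords (all tagged with the same pair pc)
theorem pvFold_block (cl : String) (pc : Int × String) (kws : List String)
    (acc : Option (Int × String)) :
    (kws.map (fun w => (pc, w))).foldl
      (fun acc e => if PySem.Str.isIn e.2 cl then pvMinOpt acc e.1 else acc) acc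
    = if kws.any (fun w => PySem.Str.isIn w cl) then pvMinOpt acc pc else acc := by
  induction kws generalizing acc with
  | nil => simp
  | cons w rest ih =>
    simp only [List.map_cons, List.foldl_cons, List.any_cons]
    by_cases h : PySem.Str.isIn w cl = true
    · rw [if_pos h, ih]
      simp only [h, Bool.true_or, if_true]
      split_ifs with h2
      · exact pvMinOpt_idem acc pc
      · rfl
    · rw [Bool.not_eq_true] at h
      simp only [h, Bool.false_eq_true, if_false, Bool.false_or]
      exact ih acc

-- the flat index is the concatenation of the seven per-category blocks
theorem pvKeywordIndex_blocks :
    pvKeywordIndex =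
      (["git", "python", "pip", "npm", "node", "java", "gcc", "make"].map (fun w => (((0 : Int), "development"), w)))
      ++ (["ls", "cd", "cp", "mv", "rm", "mkdir", "find", "grep"].map (fun w => (((1 : Int), "file_operations"), w)))
      ++ (["sudo", "apt", "yum", "systemctl", "service", "crontab"].map (fun w => (((2 : Int), "system_admin"), w)))
      ++ (["wget", "curl", "ssh", "scp", "ping", "netstat"].map (fun w => (((3 : Int), "network"), w)))
      ++ (["nvidia-smi", "jupyter", "tensorboard", "conda"].map (fun w => (((4 : Int), "ai_ml"), w)))
      ++ (["sed", "awk", "sort", "uniq", "head", "tail", "cat"].map (fun w => (((5 : Int), "text_processing"), w)))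
      ++ (["ffmpeg", "convert", "gimp", "vlc"].map (fun w => (((6 : Int), "media"), w))) := by
  rfl

-- ===== VERDICT (by name: the statement is the Claim_ definition above) =====
set_option maxHeartbeats 1000000 in
theorem categorize_command_py_spec : Claim_equal_categorize_command_py := by
  intro command _
  unfold Spec_categorize_command_py categorize_command_py categorize_command_py_alt
  rw [pvKeywordIndex_blocks]
  simp only [List.foldl_append, pvFold_block]
  by_cases h1 : (["git", "python", "pip", "npm", "node", "java", "gcc", "make"].any
      (fun word => PySem.Str.isIn word (PySem.Str.lower command))) = true
  · simp only [h1, Bool.false_eq_true, eq_self_iff_true, if_true, if_false]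
    simp [pvMinOpt, pvLexLt]
  · rw [Bool.not_eq_true] at h1
    by_cases h2 : (["ls", "cd", "cp", "mv", "rm", "mkdir", "find", "grep"].any
        (fun word => PySem.Str.isIn word (PySem.Str.lower command))) = true
    · simp only [h1, h2, Bool.false_eq_true, eq_self_iff_true, if_true, if_false]
      simp [pvMinOpt, pvLexLt]
    · rw [Bool.not_eq_true] at h2
      by_cases h3 : (["sudo", "apt", "yum", "systemctl", "service", "crontab"].any
          (fun word => PySem.Str.isIn word (PySem.Str.lower command))) = true
      · simp only [h1, h2, h3, Bool.false_eq_true, eq_self_iff_true, if_true, if_false]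
        simp [pvMinOpt, pvLexLt]
      · rw [Bool.not_eq_true] at h3
        by_cases h4 : (["wget", "curl", "ssh", "scp", "ping", "netstat"].any
            (fun word => PySem.Str.isIn word (PySem.Str.lower command))) = true
        · simp only [h1, h2, h3, h4, Bool.false_eq_true, eq_self_iff_true, if_true, if_false]
          simp [pvMinOpt, pvLexLt]
        · rw [Bool.not_eq_true] at h4
          by_cases h5 : (["nvidia-smi", "jupyter", "tensorboard", "conda"].any
              (fun word => PySem.Str.isIn word (PySem.Str.lower command))) = true
          · simp only [h1, h2, h3, h4, h5, Bool.false_eq_true, eq_self_iff_true, if_true, if_false]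
            simp [pvMinOpt, pvLexLt]
          · rw [Bool.not_eq_true] at h5
            by_cases h6 : (["sed", "awk", "sort", "uniq", "head", "tail", "cat"].any
                (fun word => PySem.Str.isIn word (PySem.Str.lower command))) = true
            · simp only [h1, h2, h3, h4, h5, h6, Bool.false_eq_true, eq_self_iff_true, if_true, if_false]
              simp [pvMinOpt, pvLexLt]
            · rw [Bool.not_eq_true] at h6
              by_cases h7 : (["ffmpeg", "convert", "gimp", "vlc"].any
                  (fun word => PySem.Str.isIn word (PySem.Str.lower command))) = true
              · simp only [h1, h2, h3, h4, h5, h6, h7, Bool.false_eq_true, eq_self_iff_true, if_true, if_false]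
                simp [pvMinOpt, pvLexLt]
              · rw [Bool.not_eq_true] at h7
                simp only [h1, h2, h3, h4, h5, h6, h7, Bool.false_eq_true, eq_self_iff_true, if_true, if_false]
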